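-- pv_equiv track=rewrite | github.com/dtote/Kyber-API | kypher.py | pointwise
-- ===== SOURCE A (Python) =====
-- def bitrev(z,n):
--   """
--   Función para realizar la transformación bit-reversal de un entero i.
--   Ejemplo: bitrev(3, 8) = 6 0b011 -> 0b110 = 6
--   Se utiliza para mejorar la eficiencia de ciertos cálculos
--   """
--   # Calcular el logaritmo en base 2 de la longitud de la secuencia
--   seq = [x for x in range(n)]
--   m = n.bit_length() - 1
--   # Inicializar la lista de salida
--   out = [0] * n
--   # Iterar sobre los elementos de la secuencia
--   for i in range(n):
--     # Calcular el índice con los bits invertidos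
--     j = int(bin(i)[2:].zfill(m)[::-1], 2)
--     # Asignar el elemento al índice correspondiente
--     out[j] = seq[i]
--
--   return out[z]
--
-- def pointwise(p,g):
--   """
--   Multiplicamos dos polinomios usando
--   la multiplicación punto a punto en Zq[x]/(x^2-w^2br(i)+1)
--   """
--   # Parámetros:
--   q=3329
--   n=256
--   phi= 17 # Ya sabemos que esta es la primera 256-raíz primitiva de Z3329.
--
--   # Ahora si el grado de alguno de los polinomios es menor que 256
--   # para aplicar NTT rellenamos con ceros pues no cambia el polinomio.
--   if len(p)<n:
--     p= p + [0] * (n-len(p))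
--
--   if len(g)<n:
--     g= g + [0] * (n-len(g))
--
--   p_par = [coef for idx, coef in enumerate(p) if idx % 2 == 0]
--   p_impar = [coef for idx, coef in enumerate(p) if idx % 2 != 0]
--
--   g_par = [coef for idx, coef in enumerate(g) if idx % 2 == 0]
--   g_impar = [coef for idx, coef in enumerate(g) if idx % 2 != 0]
--
--   point_wise_mult_par= [(p_par[i//2]*g_par[i//2]+p_impar[i//2]*g_impar[i//2]*(phi**(2*bitrev(i//2,n//2)+1)))%q for i in range(0,n,2)]
--   point_wise_mult_impar=[(p_par[(i-1)//2]*g_impar[(i-1)//2]+p_impar[(i-1)//2]*g_par[(i-1)//2])%q for i in range(1,n,2)]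
--   pog =[point_wise_mult_par[i//2] if i%2==0 else point_wise_mult_impar[(i-1)//2] for i in range(256)]
--   return pog
-- ===== SOURCE B (Python) =====
-- def pointwise(p, g):
--     """Same NTT-domain pointwise product, but one pass over 128 index pairs:
--     the 7-bit reversal is computed by bit twiddling (no per-index table/strings)
--     and the twiddle power is reduced with modular pow."""
--     q = 3329
--     def get(xs, i):
--         return xs[i] if i < len(xs) else 0
--     out = []
--     for i in range(128):
--         r = 0
--         x = i
--         for _ in range(7):
--             r = (r << 1) | (x & 1)
--             x >>= 1
--         w = pow(17, 2 * r + 1, q)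
--         a0 = get(p, 2 * i)
--         a1 = get(p, 2 * i + 1)
--         b0 = get(g, 2 * i)
--         b1 = get(g, 2 * i + 1)
--         out.append((a0 * b0 + a1 * b1 * w) % q)
--         out.append((a0 * b1 + a1 * b0) % q)
--     return out
-- ===== Notes on version B (the rewrite author's own statement) =====
-- stated objective: faster
-- what changed: Single pass over the 128 coefficient pairs with the 7-bit reversal computed by bit twiddling and the twiddle reduced via modular pow, instead of zero-padding, even/odd splitting lists, a per-index O(n) bit-reversal table built from strings, and full big-integer phi**e.
import Mathlib
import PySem

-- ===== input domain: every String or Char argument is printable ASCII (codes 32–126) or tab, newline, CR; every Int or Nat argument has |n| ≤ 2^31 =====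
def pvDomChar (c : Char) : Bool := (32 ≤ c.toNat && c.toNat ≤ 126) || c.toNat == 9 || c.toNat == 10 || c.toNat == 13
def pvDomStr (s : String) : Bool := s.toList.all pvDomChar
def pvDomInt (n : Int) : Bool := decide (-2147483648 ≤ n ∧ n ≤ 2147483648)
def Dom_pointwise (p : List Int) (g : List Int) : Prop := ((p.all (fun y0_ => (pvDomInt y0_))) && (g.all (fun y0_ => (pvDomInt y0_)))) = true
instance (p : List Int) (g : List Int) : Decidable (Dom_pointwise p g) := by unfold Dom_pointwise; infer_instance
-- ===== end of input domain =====

-- B replaces A's zero-padding + even/odd split lists + per-index string-built bit-reversal table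
-- + full big-integer phi**e by one pass over the 128 coefficient pairs with a bit-twiddled
-- 7-bit reversal and a modular pow (objective: faster).

-- ===== PORT A =====
-- A's helper bitrev: builds the whole reversal table on each call, via bin()/zfill/[::-1]/int(s,2).
-- On every call A makes all indices are in range and int(...,2) parses, so the .getD defaults of
-- the option-valued PySem primitives are never used.
def bitrev (z : Int) (n : Int) : Int :=
  let seq := PySem.List.pyRange 0 n 1
  let m : Int := (PySem.Int.bitLength n : Int) - 1
  let out : List Int := List.replicate n.toNat 0
  let out := (PySem.List.pyRange 0 n 1).foldl (fun out i =>
    -- j = int(bin(i)[2:].zfill(m)[::-1], 2)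
    let j := (PySem.Int.ofCharsBase?
      ((PySem.List.slice? (PySem.Chars.zfill
          (PySem.List.slice (PySem.Int.toBinChars0b i) (some 2) none) m) none none (-1)).getD []) 2).getD 0
    PySem.List.pySetD out j (PySem.List.pyGetD seq i 0)) out
  PySem.List.pyGetD out z 0

-- the comprehensions '[coef for idx, coef in enumerate(l) if idx % 2 == 0]' resp. '... != 0'
def evensA (l : List Int) : List Int :=
  ((PySem.List.enumerate l).filter (fun x => PySem.Int.mod x.1 2 == 0)).map (fun x => x.2)
def oddsA (l : List Int) : List Int :=
  ((PySem.List.enumerate l).filter (fun x => !(PySem.Int.mod x.1 2 == 0))).map (fun x => x.2)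

def pointwise (p : List Int) (g : List Int) : List Int :=
  let q : Int := 3329
  let n : Int := 256
  let phi : Int := 17
  let p := if PySem.List.len p < n then p ++ List.replicate (n - PySem.List.len p).toNat 0 else p
  let g := if PySem.List.len g < n then g ++ List.replicate (n - PySem.List.len g).toNat 0 else g
  let p_par := evensA p
  let p_impar := oddsA p
  let g_par := evensA g
  let g_impar := oddsA g
  -- phi ** e with e = 2*bitrev(..)+1 ≥ 0: Int pow with .toNat exponent is exact
  let par := (PySem.List.pyRange 0 n 2).map (fun i =>
    PySem.Int.mod
      (PySem.List.pyGetD p_par (PySem.Int.floordiv i 2) 0 * PySem.List.pyGetD g_par (PySem.Int.floordiv i 2) 0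
       + PySem.List.pyGetD p_impar (PySem.Int.floordiv i 2) 0 * PySem.List.pyGetD g_impar (PySem.Int.floordiv i 2) 0
         * phi ^ (2 * bitrev (PySem.Int.floordiv i 2) (PySem.Int.floordiv n 2) + 1).toNat) q)
  let impar := (PySem.List.pyRange 1 n 2).map (fun i =>
    PySem.Int.mod
      (PySem.List.pyGetD p_par (PySem.Int.floordiv (i - 1) 2) 0 * PySem.List.pyGetD g_impar (PySem.Int.floordiv (i - 1) 2) 0
       + PySem.List.pyGetD p_impar (PySem.Int.floordiv (i - 1) 2) 0 * PySem.List.pyGetD g_par (PySem.Int.floordiv (i - 1) 2) 0) q)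
  (PySem.List.pyRange 0 256 1).map (fun i =>
    if PySem.Int.mod i 2 == 0 then PySem.List.pyGetD par (PySem.Int.floordiv i 2) 0
    else PySem.List.pyGetD impar (PySem.Int.floordiv (i - 1) 2) 0)

-- ===== PORT B =====
-- B's get(xs, i) = xs[i] if i < len(xs) else 0; B only calls it with i ≥ 0, so it is List.getD
def getzB (xs : List Int) (i : Nat) : Int := xs.getD i 0
-- B's 7-iteration bit-twiddle loop; (r<<1)|(x&1) = 2*r + x%2 and x >>= 1 = x/2 on naturals (exact)
def rev7B (i : Nat) : Nat :=
  ((List.range 7).foldl (fun (s : Nat × Nat) _ => (2 * s.1 + s.2 % 2, s.2 / 2)) (0, i)).1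

def pointwise_alt (p : List Int) (g : List Int) : List Int :=
  (List.range 128).foldl (fun out i =>
    let r := rev7B i
    -- pow(17, 2r+1, q)
    let w := PySem.Int.mod ((17 : Int) ^ (2 * r + 1)) 3329
    let a0 := getzB p (2 * i)
    let a1 := getzB p (2 * i + 1)
    let b0 := getzB g (2 * i)
    let b1 := getzB g (2 * i + 1)
    out ++ [PySem.Int.mod (a0 * b0 + a1 * b1 * w) 3329,
            PySem.Int.mod (a0 * b1 + a1 * b0) 3329]) []

-- ===== PRECONDITION & SPEC =====
def Spec_pointwise (p : List Int) (g : List Int) (out : List Int) : Prop := out = pointwise_alt p g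
instance (p : List Int) (g : List Int) (out : List Int) : Decidable (Spec_pointwise p g out) := by unfold Spec_pointwise; infer_instance

-- ===== CLAIM (what is proved, stated in full; the proofs are below) =====
def Claim_equal_pointwise : Prop := ∀ (p : List Int) (g : List Int), Dom_pointwise p g → Spec_pointwise p g (pointwise p g)

-- ===== LEMMAS AND PROOFS =====

-- the enumerate-filter comprehensions with an explicit start index (proof-only generalisation)
def evF (l : List Int) (s : Int) : List Int :=
  ((PySem.List.enumerate l s).filter (fun x => PySem.Int.mod x.1 2 == 0)).map (fun x => x.2)
def odF (l : List Int) (s : Int) : List Int :=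
  ((PySem.List.enumerate l s).filter (fun x => !(PySem.Int.mod x.1 2 == 0))).map (fun x => x.2)

theorem mod_two_emod (a : Int) : PySem.Int.mod a 2 = a % 2 :=
  PySem.Int.mod_eq_emod_of_pos (by omega)

theorem evF_cons (a : Int) (t : List Int) (s : Int) :
    evF (a :: t) s = if s % 2 = 0 then a :: evF t (s + 1) else evF t (s + 1) := by
  unfold evF
  rw [PySem.List.enumerate_cons, List.filter_cons]
  by_cases h : s % 2 = 0 <;> simp [h]

theorem odF_cons (a : Int) (t : List Int) (s : Int) :
    odF (a :: t) s = if s % 2 = 0 then odF t (s + 1) else a :: odF t (s + 1) := by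
  unfold odF
  rw [PySem.List.enumerate_cons, List.filter_cons]
  by_cases h : s % 2 = 0 <;> simp [h]

-- the even/odd comprehensions read through getD with default 0
theorem enumFilter (l : List Int) : ∀ (s : Int) (k : Nat),
    (s % 2 = 0 → (evF l s).getD k 0 = l.getD (2 * k) 0 ∧ (odF l s).getD k 0 = l.getD (2 * k + 1) 0) ∧
    (s % 2 = 1 → (evF l s).getD k 0 = l.getD (2 * k + 1) 0 ∧ (odF l s).getD k 0 = l.getD (2 * k) 0) := by
  induction l with
  | nil => intro s k; simp [evF, odF, PySem.List.enumerate]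
  | cons a t ih =>
    intro s k
    constructor
    · intro h0
      have h1 : (s + 1) % 2 = 1 := by omega
      rw [evF_cons, odF_cons, if_pos h0, if_pos h0]
      constructor
      · cases k with
        | zero => simp
        | succ k =>
          have h2 : 2 * (k + 1) = 2 * k + 1 + 1 := by ring
          rw [h2, List.getD_cons_succ, List.getD_cons_succ]
          exact ((ih (s + 1) k).2 h1).1
      · rw [List.getD_cons_succ]
        exact ((ih (s + 1) k).2 h1).2
    · intro h1
      have h0 : (s + 1) % 2 = 0 := by omega
      have hne : ¬ s % 2 = 0 := by omega
      rw [evF_cons, odF_cons, if_neg hne, if_neg hne]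
      constructor
      · rw [List.getD_cons_succ]
        exact ((ih (s + 1) k).1 h0).1
      · cases k with
        | zero => simp
        | succ k =>
          have h2 : 2 * (k + 1) = 2 * k + 1 + 1 := by ring
          rw [h2, List.getD_cons_succ, List.getD_cons_succ]
          exact ((ih (s + 1) k).1 h0).2

theorem evensA_eq (l : List Int) : evensA l = evF l 0 := rfl
theorem oddsA_eq (l : List Int) : oddsA l = odF l 0 := rfl

-- padding with zeros does not change getD with default 0
theorem pad_getD (l : List Int) (m k : Nat) :
    (l ++ List.replicate m 0).getD k 0 = l.getD k 0 := by
  simp only [List.getD, List.getElem?_append, List.getElem?_replicate]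
  split
  · rfl
  · split <;> simp_all

-- A's padded list reads like the original through getD 0
theorem padded_getD (l : List Int) (k : Nat) :
    (if PySem.List.len l < 256 then l ++ List.replicate ((256 : Int) - PySem.List.len l).toNat 0 else l).getD k 0
      = l.getD k 0 := by
  split
  · exact pad_getD l _ k
  · rfl

-- A's bitrev agrees with B's bit-twiddled 7-bit reversal on 0..127
set_option maxHeartbeats 4000000 in
set_option maxRecDepth 100000 in
theorem bitrev_table :
    (List.range 128).all (fun k => bitrev (k : Int) 128 == (rev7B k : Int)) = true := by decide

set_option maxRecDepth 100000 in
theorem range256_pairs :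
    PySem.List.pyRange 0 256 1
      = (List.range 128).flatMap (fun k => [((2 * k : Nat) : Int), ((2 * k + 1 : Nat) : Int)]) := by
  decide

set_option maxRecDepth 100000 in
theorem range_even :
    PySem.List.pyRange 0 256 2 = (List.range 128).map (fun k => ((2 * k : Nat) : Int)) := by decide

set_option maxRecDepth 100000 in
theorem range_odd :
    PySem.List.pyRange 1 256 2 = (List.range 128).map (fun k => ((2 * k + 1 : Nat) : Int)) := by decide

theorem getD_map_range' (f : Nat → Int) (n k : Nat) (h : k < n) :
    ((List.range n).map f).getD k 0 = f k := by
  simp [List.getD, h]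

-- B's loop as a flatMap
theorem foldB (step : List Int → Nat → List Int) (e o : Nat → Int)
    (hstep : ∀ acc i, step acc i = acc ++ [e i, o i]) :
    ∀ (l : List Nat) (acc : List Int),
      l.foldl step acc = acc ++ l.flatMap (fun i => [e i, o i]) := by
  intro l
  induction l with
  | nil => simp
  | cons a t ih => intro acc; simp [hstep, ih, List.append_assoc]

-- reducing the twiddle factor mod q before multiplying does not change the result mod q
theorem mod_twiddle (a b t : Int) :
    PySem.Int.mod (a + b * PySem.Int.mod t 3329) 3329 = PySem.Int.mod (a + b * t) 3329 := by
  simp only [PySem.Int.mod_eq_emod_of_pos (show (0:Int) < 3329 by norm_num)]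
  conv_lhs => rw [Int.add_emod, Int.mul_emod]
  conv_rhs => rw [Int.add_emod, Int.mul_emod]
  rw [Int.emod_emod_of_dvd _ (dvd_refl (3329 : Int))]

-- ===== VERDICT (by name: the statement is the Claim_ definition above) =====
theorem pointwise_spec : Claim_equal_pointwise := by
  intro p g _
  unfold Spec_pointwise pointwise pointwise_alt
  rw [foldB _ (fun i => PySem.Int.mod
        (getzB p (2 * i) * getzB g (2 * i)
          + getzB p (2 * i + 1) * getzB g (2 * i + 1) * PySem.Int.mod ((17 : Int) ^ (2 * rev7B i + 1)) 3329) 3329)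
      (fun i => PySem.Int.mod (getzB p (2 * i) * getzB g (2 * i + 1) + getzB p (2 * i + 1) * getzB g (2 * i)) 3329)
      (fun acc i => rfl)]
  rw [List.nil_append, range256_pairs, List.map_flatMap]
  simp only [List.flatMap_def]
  apply congrArg List.flatten
  apply List.map_congr_left
  intro k hk
  have hk' : k < 128 := List.mem_range.mp hk
  have hev : ∀ (l : List Int) (j : Nat), (evF l 0).getD j 0 = l.getD (2 * j) 0 :=
    fun l j => ((enumFilter l 0 j).1 (by norm_num)).1
  have hod : ∀ (l : List Int) (j : Nat), (odF l 0).getD j 0 = l.getD (2 * j + 1) 0 :=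
    fun l j => ((enumFilter l 0 j).1 (by norm_num)).2
  have hc0 : (PySem.Int.mod ((2 * k : Nat) : Int) 2 == 0) = true := by
    rw [mod_two_emod]; simp only [beq_iff_eq]; push_cast; omega
  have hc1 : (PySem.Int.mod ((2 * k + 1 : Nat) : Int) 2 == 0) = false := by
    rw [mod_two_emod]; simp only [beq_eq_false_iff_ne, ne_eq]; push_cast; omega
  have hfd2 : ∀ (m : Nat), PySem.Int.floordiv ((2 * m : Nat) : Int) 2 = (m : Int) := by
    intro m; rw [PySem.Int.floordiv_eq_ediv_of_pos (show (0:Int) < 2 by norm_num)]; push_cast; omega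
  have hfd2' : ∀ (m : Nat), PySem.Int.floordiv (((2 * m + 1 : Nat) : Int) - 1) 2 = (m : Int) := by
    intro m; rw [PySem.Int.floordiv_eq_ediv_of_pos (show (0:Int) < 2 by norm_num)]; push_cast; omega
  have h128 : PySem.Int.floordiv 256 2 = 128 := by decide
  have hbr : bitrev (k : Int) 128 = (rev7B k : Int) := by
    have h := bitrev_table
    rw [List.all_eq_true] at h
    exact beq_iff_eq.mp (h k hk)
  simp only [List.map_cons, List.map_nil, hc0, hc1, if_true, if_false, Bool.false_eq_true,
    range_even, range_odd, List.map_map, hfd2, hfd2', PySem.List.pyGetD_natCast]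
  rw [getD_map_range' _ 128 k hk', getD_map_range' _ 128 k hk']
  simp only [Function.comp_apply, hfd2, hfd2', PySem.List.pyGetD_natCast,
    evensA_eq, oddsA_eq, hev, hod, padded_getD, h128, hbr, getzB]
  have hexp : ((2 : Int) * (rev7B k : Int) + 1).toNat = 2 * rev7B k + 1 := by omega
  rw [hexp, mod_twiddle]
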